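-- pv_equiv track=rewrite | github.com/CarlaFernandez/Side-Projects | while_programs.py | divMod
-- ===== SOURCE A (Python) =====
-- def substract(x1, x2):
--     x3 = 0
--     while x2 != x3:
--         x1-=1
--         x2-=1
--     return x1
--
-- def mod(x1,x2):
--     x1 += 1
--     x3 = 0
--     x4 = 0
--     while x1 > x3:
--         x4 = x1
--         x1 = substract(x1,x2)
--
--     x1 = x4-1
--     return x1
--
-- def divMod(x1,x2):
--     '''This function performs the operation:
--         y / (x % y)'''
--     x3 = 0
--     x4 = 0
--     x6 = x2
--     while x6 > x3:
--         x5 = mod(x1,x2)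
--         x6 = substract(x6,x5)
--         x4 += 1
--     x1 = x4
--     return x1
-- ===== SOURCE B (Python) =====
-- def divMod(x1, x2):
--     '''This function performs the operation:
--         y / (x % y)'''
--     if x2 <= 0:
--         return 0
--     m = x1 % x2
--     return -(-x2 // m)
-- ===== Notes on version B (the rewrite author's own statement) =====
-- stated objective: faster
-- what changed: Replaced the unary subtraction/mod/division loops by native arithmetic: m = x1 % x2 and ceiling division -(-x2 // m), O(1) instead of O(x2 * x1) loop iterations.
import Mathlib
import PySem

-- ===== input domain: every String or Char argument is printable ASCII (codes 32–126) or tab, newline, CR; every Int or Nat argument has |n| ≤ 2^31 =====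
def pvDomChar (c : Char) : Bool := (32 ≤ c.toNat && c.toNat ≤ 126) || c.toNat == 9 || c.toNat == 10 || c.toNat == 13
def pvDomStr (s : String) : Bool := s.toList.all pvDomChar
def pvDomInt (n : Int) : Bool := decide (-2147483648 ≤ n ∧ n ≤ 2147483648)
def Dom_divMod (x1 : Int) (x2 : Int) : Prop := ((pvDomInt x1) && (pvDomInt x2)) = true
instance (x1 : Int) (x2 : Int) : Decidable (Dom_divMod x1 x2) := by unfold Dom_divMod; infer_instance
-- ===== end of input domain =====

-- B replaces A's unary subtraction/mod/division loops by native arithmetic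
-- (m = x1 % x2, then ceiling division -(-x2 // m)); faster: O(1) vs A's nested loops.

-- ===== PORT A =====
-- while x2 != x3: x1 -= 1; x2 -= 1   (fuel x2.toNat makes the loop total; exact whenever 0 ≤ x2,
-- which holds at every call reached on Pre_ inputs; A diverges when x2 < 0)
def subGo : Nat → Int → Int → Int
  | 0, x1, _ => x1
  | f + 1, x1, x2 => if x2 ≠ 0 then subGo f (x1 - 1) (x2 - 1) else x1

def substract (x1 : Int) (x2 : Int) : Int := subGo x2.toNat x1 x2

-- while x1 > x3: x4 = x1; x1 = substract(x1, x2)   (fuel = the initial x1, an iteration-count bound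
-- whenever 0 < x2, which Pre_ guarantees at every call; A diverges when x2 ≤ 0 and x1 > 0)
def modGo : Nat → Int → Int → Int → Int
  | 0, _, _, x4 => x4
  | f + 1, x1, x2, x4 => if x1 > 0 then modGo f (substract x1 x2) x2 x1 else x4

def pyMod (x1 : Int) (x2 : Int) : Int := modGo (x1 + 1).toNat (x1 + 1) x2 0 - 1

-- while x6 > x3: x5 = mod(x1, x2); x6 = substract(x6, x5); x4 += 1   (fuel = the initial x6 = x2,
-- an iteration-count bound whenever 0 < x1 % x2, which Pre_ guarantees; A diverges otherwise)
def divModGo (x1 : Int) (x2 : Int) : Nat → Int → Int → Int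
  | 0, x4, _ => x4
  | f + 1, x4, x6 =>
      if x6 > 0 then divModGo x1 x2 f (x4 + 1) (substract x6 (pyMod x1 x2)) else x4

def divMod (x1 : Int) (x2 : Int) : Int := divModGo x1 x2 x2.toNat 0 x2

-- ===== PORT B =====
def divMod_alt (x1 : Int) (x2 : Int) : Int :=
  if x2 ≤ 0 then 0
  else
    let m := PySem.Int.mod x1 x2;
    -(PySem.Int.floordiv (-x2) m)

-- ===== PRECONDITION & SPEC =====
-- Pre_ excludes exactly the inputs on which A diverges: x2 > 0 with x1 < 0, and x2 > 0 with x2 ∣ x1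
-- (there A's inner loops never terminate); everywhere else A returns normally.
def Pre_divMod (x1 : Int) (x2 : Int) : Prop :=
  x2 ≤ 0 ∨ (0 ≤ x1 ∧ PySem.Int.mod x1 x2 ≠ 0)
instance (x1 : Int) (x2 : Int) : Decidable (Pre_divMod x1 x2) := by unfold Pre_divMod; infer_instance

def pvWitness_divMod : Int × Int := (7, 3)

def Spec_divMod (x1 : Int) (x2 : Int) (out : Int) : Prop := out = divMod_alt x1 x2
instance (x1 : Int) (x2 : Int) (out : Int) : Decidable (Spec_divMod x1 x2 out) := by unfold Spec_divMod; infer_instance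

-- ===== CLAIM (what is proved, stated in full; the proofs are below) =====
def Claim_equal_divMod : Prop := ∀ (x1 : Int) (x2 : Int), Dom_divMod x1 x2 → Pre_divMod x1 x2 → Spec_divMod x1 x2 (divMod x1 x2)

-- ===== LEMMAS AND PROOFS =====

-- the subtraction loop computes x1 - x2 whenever 0 ≤ x2 and the fuel covers it
theorem subGo_eq (f : Nat) : ∀ (a b : Int), 0 ≤ b → b.toNat ≤ f → subGo f a b = a - b := by
  induction f with
  | zero =>
      intro a b hb hf
      have hb0 : b = 0 := by omega
      subst hb0
      simp [subGo]
  | succ f ih =>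
      intro a b hb hf
      by_cases h : b = 0
      · simp [subGo, h]
      · simp only [subGo, h, ne_eq, not_false_eq_true, if_true]
        rw [ih (a - 1) (b - 1) (by omega) (by omega)]
        ring

theorem substract_eq (a b : Int) (hb : 0 ≤ b) : substract a b = a - b :=
  subGo_eq b.toNat a b hb le_rfl

-- the mod loop: last positive member of y, y - b, y - 2b, … is (y-1) % b + 1
theorem modGo_eq (f : Nat) : ∀ (y b x4 : Int), 0 < b → 0 < y → y.toNat ≤ f →
    modGo f y b x4 = (y - 1) % b + 1 := by
  induction f with
  | zero => intro y b x4 hb hy hf; omega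
  | succ f ih =>
      intro y b x4 hb hy hf
      simp only [modGo, hy, if_true]
      rw [substract_eq y b (by omega)]
      by_cases h : 0 < y - b
      · rw [ih (y - b) b y hb h (by omega)]
        have : y - b - 1 = y - 1 - b := by ring
        rw [this, Int.sub_emod_right]
      · -- y ≤ b : the next call returns its x4 = y (fuel 0 or a false loop test alike)
        have hyb : y ≤ b := by omega
        have hret : modGo f (y - b) b y = y := by
          cases f with
          | zero => rfl
          | succ f' => simp only [modGo, gt_iff_lt, if_neg h]
        rw [hret, Int.emod_eq_of_lt (by omega) (by omega)]
        ring

theorem pyMod_eq (x1 x2 : Int) (h1 : 0 ≤ x1) (h2 : 0 < x2) : pyMod x1 x2 = x1 % x2 := by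
  unfold pyMod
  rw [modGo_eq (x1 + 1).toNat (x1 + 1) x2 0 h2 (by omega) le_rfl]
  simp

-- the outer loop counts iterations: it adds the unique q with (q-1)*m < x6 ≤ q*m
theorem divModGo_eq (x1 x2 : Int) (h1 : 0 ≤ x1) (h2 : 0 < x2) (hm : 0 < x1 % x2)
    (f : Nat) : ∀ (x4 x6 q : Int), 0 < x6 → (q - 1) * (x1 % x2) < x6 → x6 ≤ q * (x1 % x2) →
    x6.toNat ≤ f → divModGo x1 x2 f x4 x6 = x4 + q := by
  set m := x1 % x2 with hmdef
  induction f with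
  | zero =>
      intro x4 x6 q hx6 hlo hhi hf
      omega
  | succ f ih =>
      intro x4 x6 q hx6 hlo hhi hf
      simp only [divModGo, hx6, if_true]
      rw [pyMod_eq x1 x2 h1 h2, ← hmdef, substract_eq x6 m (by omega)]
      by_cases h : 0 < x6 - m
      · rw [ih (x4 + 1) (x6 - m) (q - 1) h (by nlinarith) (by nlinarith) (by omega)]
        ring
      · -- x6 ≤ m : the loop stops after this iteration and q must be 1
        have hq1 : q = 1 := by
          by_contra hq
          rcases (by omega : q ≤ 0 ∨ 2 ≤ q) with hq' | hq'
          · have := mul_le_mul_of_nonneg_right hq' hm.le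
            simp at this; omega
          · have := mul_le_mul_of_nonneg_right (by omega : (1:ℤ) ≤ q - 1) hm.le
            simp at this; omega
        have hret : divModGo x1 x2 f (x4 + 1) (x6 - m) = x4 + 1 := by
          cases f with
          | zero => rfl
          | succ f' => simp only [divModGo, gt_iff_lt, if_neg h]
        rw [hret, hq1]

-- ===== VERDICT (by name: the statement is the Claim_ definition above) =====
theorem divMod_spec : Claim_equal_divMod := by
  intro x1 x2 _ hpre
  unfold Spec_divMod divMod divMod_alt
  by_cases h2 : x2 ≤ 0
  · have : x2.toNat = 0 := by omega
    simp [this, divModGo, h2]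
  · rw [not_le] at h2
    rcases hpre with h | ⟨h1, hm⟩
    · omega
    · rw [PySem.Int.mod_eq_emod_of_pos h2] at hm ⊢
      have hm' : 0 < x1 % x2 := lt_of_le_of_ne (Int.emod_nonneg x1 (by omega)) (Ne.symm hm)
      set q := -(PySem.Int.floordiv (-x2) (x1 % x2)) with hq
      have hbr : (q - 1) * (x1 % x2) < x2 ∧ x2 ≤ q * (x1 % x2) :=
        (PySem.Int.neg_floordiv_neg_eq_iff_of_pos hm').1 hq.symm
      rw [divModGo_eq x1 x2 h1 h2 hm' x2.toNat 0 x2 q h2 hbr.1 hbr.2 le_rfl]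
      simp [not_le.mpr h2, hq]
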